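-- pv_equiv track=rewrite | github.com/taegyeongeo/News-Domain-Question-Answering-System | preprocessing/korquad2_preprocess.py | get_text_positions
-- ===== SOURCE A (Python) =====
-- def get_text_positions(text, html, last_position, is_eval=False):
--     if is_eval:
--         return 0, []
--
--     position_ids = []
--     for substr in text:
--         last_position = get_str_position(substr, html, last_position, is_eval)
--         position_ids.append(last_position)
--     return last_position, position_ids
--
-- def get_str_position(substr, html, last_position, is_eval=False):
--     if is_eval:
--         return 0
--
--     new_position = html.find(substr, last_position + 1)
--     if new_position == -1:
--         return last_position
--     return new_position
-- ===== SOURCE B (Python) =====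
-- def get_text_positions(text, html, last_position, is_eval=False):
--     if is_eval:
--         return 0, []
--
--     n = len(html)
--     positions = {}
--     for i, ch in enumerate(html):
--         positions.setdefault(ch, []).append(i)
--
--     position_ids = []
--     for ch in text:
--         start = last_position + 1
--         lb = start if start >= 0 else (n + start if n + start >= 0 else 0)
--         lst = positions.get(ch)
--         if lst is not None:
--             lo, hi = 0, len(lst)
--             while lo < hi:
--                 mid = (lo + hi) // 2
--                 if lst[mid] < lb:
--                     lo = mid + 1
--                 else:
--                     hi = mid
--             if lo < len(lst):
--                 last_position = lst[lo]
--         position_ids.append(last_position)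
--     return last_position, position_ids
-- ===== Notes on version B (the rewrite author's own statement) =====
-- stated objective: faster
-- what changed: instead of re-scanning html with str.find for every character of text, B builds one char->sorted-positions index of html in a single pass and answers each character by a hand-written binary search for the first position at or past the (find-style clamped) start
import Mathlib
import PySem

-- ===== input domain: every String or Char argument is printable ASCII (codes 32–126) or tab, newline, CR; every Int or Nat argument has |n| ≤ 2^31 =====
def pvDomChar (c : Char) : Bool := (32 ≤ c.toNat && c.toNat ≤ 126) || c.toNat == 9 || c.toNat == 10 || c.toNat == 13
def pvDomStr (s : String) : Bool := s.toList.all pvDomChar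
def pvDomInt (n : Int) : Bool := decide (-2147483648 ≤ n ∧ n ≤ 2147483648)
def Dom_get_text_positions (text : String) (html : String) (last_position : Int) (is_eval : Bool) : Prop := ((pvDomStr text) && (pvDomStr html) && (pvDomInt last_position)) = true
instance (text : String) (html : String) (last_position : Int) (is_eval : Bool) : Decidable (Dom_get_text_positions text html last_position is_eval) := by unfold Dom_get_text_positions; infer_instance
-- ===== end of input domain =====

-- B replaces A's per-character str.find re-scan of html by a one-pass char->sorted-positions
-- index of html plus a binary search per text character (objective: faster).

-- ===== PORT A =====
def get_str_position (substr : Char) (html : String) (last_position : Int) (is_eval : Bool) : Int :=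
  if is_eval then 0
  else
    let new_position := PySem.Str.findFrom html (String.singleton substr) (last_position + 1)
    if new_position = -1 then last_position else new_position

def get_text_positions (text : String) (html : String) (last_position : Int) (is_eval : Bool) : Int × List Int :=
  if is_eval then (0, [])
  else
    text.toList.foldl
      (fun st substr =>
        let lp := get_str_position substr html st.1 is_eval
        (lp, st.2 ++ [lp]))
      (last_position, ([] : List Int))

-- ===== PORT B =====
-- the index-building loop of Source B: positions.setdefault(ch, []).append(i) over enumerate(html)
def pvBuildPositions (s : List Char) : PySem.Dict Char (List Int) :=
  (PySem.List.enumerate s).foldl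
    (fun d p => d.modify p.2 [] (fun l => l ++ [p.1]))
    PySem.Dict.empty

-- the hand-written while-loop binary search of Source B (lo, hi exactly as in the Python)
def pvBsearch (lst : List Int) (lb : Int) (lo hi : Nat) : Nat :=
  if _h : lo < hi then
    let mid := (lo + hi) / 2
    if lst.getD mid 0 < lb then pvBsearch lst lb (mid + 1) hi
    else pvBsearch lst lb lo mid
  else lo
termination_by hi - lo
decreasing_by all_goals omega

def get_text_positions_alt (text : String) (html : String) (last_position : Int) (is_eval : Bool) : Int × List Int :=
  if is_eval then (0, [])
  else
    let s := html.toList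
    let n : Int := s.length
    let positions := pvBuildPositions s
    text.toList.foldl
      (fun st ch =>
        let start := st.1 + 1
        let lb := if 0 ≤ start then start else if 0 ≤ n + start then n + start else 0
        let lp :=
          match positions.get? ch with
          | none => st.1
          | some lst =>
              let lo := pvBsearch lst lb 0 lst.length
              if lo < lst.length then lst.getD lo 0 else st.1
        (lp, st.2 ++ [lp]))
      (last_position, ([] : List Int))

-- ===== PRECONDITION & SPEC =====
def Spec_get_text_positions (text : String) (html : String) (last_position : Int) (is_eval : Bool) (out : Int × List Int) : Prop := out = get_text_positions_alt text html last_position is_eval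
instance (text : String) (html : String) (last_position : Int) (is_eval : Bool) (out : Int × List Int) : Decidable (Spec_get_text_positions text html last_position is_eval out) := by unfold Spec_get_text_positions; infer_instance

-- ===== CLAIM (what is proved, stated in full; the proofs are below) =====
def Claim_equal_get_text_positions : Prop := ∀ (text : String) (html : String) (last_position : Int) (is_eval : Bool), Dom_get_text_positions text html last_position is_eval → Spec_get_text_positions text html last_position is_eval (get_text_positions text html last_position is_eval)

-- ===== LEMMAS AND PROOFS =====

-- the positions (as Ints) of the occurrences of c in s, numbering the head of s as k
def posOf : List Char → Char → Int → List Int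
  | [], _, _ => []
  | a :: t, c, k => if a = c then k :: posOf t c (k + 1) else posOf t c (k + 1)

lemma posOf_cons_self (c : Char) (t : List Char) (k : Int) :
    posOf (c :: t) c k = k :: posOf t c (k + 1) := by
  simp [posOf]

lemma posOf_cons_ne {a c : Char} (t : List Char) (k : Int) (h : a ≠ c) :
    posOf (a :: t) c k = posOf t c (k + 1) := by
  simp [posOf, h]

lemma mem_posOf (s : List Char) (c : Char) : ∀ (k x : Int),
    x ∈ posOf s c k ↔ ∃ j : Nat, s[j]? = some c ∧ x = k + j := by
  induction s with
  | nil => intro k x; simp [posOf]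
  | cons a t ih =>
    intro k x
    by_cases hac : a = c
    · subst hac
      rw [posOf_cons_self, List.mem_cons]
      constructor
      · rintro (rfl | hx)
        · exact ⟨0, by simp, by simp⟩
        · obtain ⟨j, hj, rfl⟩ := (ih (k + 1) x).1 hx
          exact ⟨j + 1, by simpa using hj, by push_cast; ring⟩
      · rintro ⟨j, hj, rfl⟩
        cases j with
        | zero => left; simp
        | succ j =>
          right
          exact (ih (k + 1) (k + (j + 1 : Nat))).2 ⟨j, by simpa using hj, by push_cast; ring⟩
    · rw [posOf_cons_ne t k hac, ih]
      constructor
      · rintro ⟨j, hj, rfl⟩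
        exact ⟨j + 1, by simpa using hj, by push_cast; ring⟩
      · rintro ⟨j, hj, rfl⟩
        cases j with
        | zero => simp at hj; exact absurd hj hac
        | succ j => exact ⟨j, by simpa using hj, by push_cast; ring⟩

lemma posOf_lb (s : List Char) (c : Char) (k x : Int) (hx : x ∈ posOf s c k) : k ≤ x := by
  obtain ⟨j, _, rfl⟩ := (mem_posOf s c k x).1 hx
  have : (0 : Int) ≤ (j : Int) := Int.natCast_nonneg j
  omega

lemma posOf_sorted (s : List Char) (c : Char) : ∀ k : Int, (posOf s c k).Pairwise (· < ·) := by
  induction s with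
  | nil => intro k; simp [posOf]
  | cons a t ih =>
    intro k
    by_cases hac : a = c
    · subst hac
      rw [posOf_cons_self]
      refine List.Pairwise.cons ?_ (ih (k + 1))
      intro x hx
      have := posOf_lb t a (k + 1) x hx
      omega
    · rw [posOf_cons_ne t k hac]
      exact ih (k + 1)

lemma posOf_filter (s : List Char) (c : Char) : ∀ k : Int,
    ((PySem.List.enumerate s k).filter (fun p => p.2 == c)).map (·.1) = posOf s c k := by
  induction s with
  | nil => intro k; simp [PySem.List.enumerate_nil, posOf]
  | cons a t ih =>
    intro k
    rw [PySem.List.enumerate_cons]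
    by_cases hac : a = c
    · subst hac; rw [posOf_cons_self]; simp [ih]
    · rw [posOf_cons_ne t k hac]; simp [hac, ih]

lemma build_getD (s : List Char) (c : Char) :
    (pvBuildPositions s).getD c [] = posOf s c 0 := by
  unfold pvBuildPositions
  have h1 : ((PySem.List.enumerate s).map Prod.swap).foldl
        (fun (d : PySem.Dict Char (List Int)) q => d.modify q.1 [] (fun l => l ++ [q.2]))
        PySem.Dict.empty
      = (PySem.List.enumerate s).foldl
        (fun d p => d.modify p.2 [] (fun l => l ++ [p.1])) PySem.Dict.empty := by
    rw [List.foldl_map]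
    rfl
  rw [← h1]
  rw [PySem.Dict.getD_foldl_modify_append, PySem.Dict.getD_empty]
  rw [List.filter_map, List.map_map]
  rw [← posOf_filter s c 0]
  rfl

lemma build_contains (s : List Char) (c : Char) :
    (pvBuildPositions s).contains c = true ↔ c ∈ s := by
  unfold pvBuildPositions
  rw [PySem.Dict.contains_eq_decide_mem_keys]
  rw [PySem.Dict.keys_foldl_modify_key]
  rw [PySem.Dict.keys_empty, PySem.List.map_snd_enumerate]
  simp [PySem.Set.mem_update]

lemma build_get?_none (s : List Char) (c : Char) (h : c ∉ s) :
    (pvBuildPositions s).get? c = none := by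
  rw [PySem.Dict.get?_eq_none_iff_contains]
  by_contra hc
  exact h ((build_contains s c).1 (by revert hc; cases (pvBuildPositions s).contains c <;> simp))

lemma build_get?_some (s : List Char) (c : Char) (h : c ∈ s) :
    (pvBuildPositions s).get? c = some (posOf s c 0) := by
  cases hg : (pvBuildPositions s).get? c with
  | none =>
    rw [PySem.Dict.get?_eq_none_iff_contains, (build_contains s c).2 h] at hg
    simp at hg
  | some v =>
    have hv := PySem.Dict.getD_of_get?_eq_some (d := pvBuildPositions s) (k := c) (v := v) ([]) hg
    rw [build_getD] at hv
    exact congrArg some hv.symm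

lemma singleton_prefix_iff (c : Char) (u : List Char) : [c] <+: u ↔ u[0]? = some c := by
  cases u with
  | nil => simp
  | cons a t => simp [List.cons_prefix_cons, eq_comm]

lemma occ_iff (s : List Char) (c : Char) (i : Nat) : [c] <+: s.drop i ↔ s[i]? = some c := by
  rw [singleton_prefix_iff]
  simp [List.getElem?_drop]

lemma find_char_none_iff (t : List Char) (c : Char) :
    PySem.Chars.find t [c] = -1 ↔ ∀ i : Nat, t[i]? ≠ some c := by
  rw [PySem.Chars.find_eq_neg_one_iff,
      ← PySem.Chars.isIn_iff_infix, ← PySem.Chars.exists_prefix_drop_iff_isIn]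
  simp only [occ_iff]
  simp

-- unfolding of Chars.findFrom at end? = none (definitional)
lemma findFrom_none_unfold (t : List Char) (sub : List Char) (start : Int) :
    PySem.Chars.findFrom t sub start none
    = (let n : Int := t.length
       let st := if start < 0 then if start + n < 0 then 0 else start + n else start
       if n < st then -1
       else if PySem.Chars.find (List.drop st.toNat (List.take n.toNat t)) sub = -1 then -1
       else st + PySem.Chars.find (List.drop st.toNat (List.take n.toNat t)) sub) := rfl

-- binary-search spec: pvBsearch on a (≤-)sorted list splits it at lb
lemma pvBsearch_spec (lst : List Int) (lb : Int)
    (hs : ∀ i j : Nat, (hij : i ≤ j) → (hj : j < lst.length) → lst[i]'(by omega) ≤ lst[j])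
    (lo hi : Nat) (hlohi : lo ≤ hi) (hhi : hi ≤ lst.length)
    (hlow : ∀ j : Nat, j < lo → (hj : j < lst.length) → lst[j] < lb)
    (hhigh : ∀ j : Nat, hi ≤ j → (hj : j < lst.length) → lb ≤ lst[j]) :
    (∀ j : Nat, j < pvBsearch lst lb lo hi → (hj : j < lst.length) → lst[j] < lb) ∧
    (∀ j : Nat, pvBsearch lst lb lo hi ≤ j → (hj : j < lst.length) → lb ≤ lst[j]) ∧
    pvBsearch lst lb lo hi ≤ lst.length := by
  unfold pvBsearch
  by_cases h : lo < hi
  · rw [dif_pos h]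
    have hmidlt : (lo + hi) / 2 < lst.length := by omega
    have hgd : lst.getD ((lo + hi) / 2) 0 = lst[(lo + hi) / 2] := List.getD_eq_getElem lst 0 hmidlt
    by_cases hcmp : lst.getD ((lo + hi) / 2) 0 < lb
    · rw [if_pos hcmp]
      exact pvBsearch_spec lst lb hs ((lo + hi) / 2 + 1) hi (by omega) hhi
        (fun j hj hjl => by
          have h1 : lst[j]'hjl ≤ lst[(lo + hi) / 2] := hs j ((lo + hi) / 2) (by omega) hmidlt
          rw [hgd] at hcmp; omega)
        hhigh
    · rw [if_neg hcmp]
      exact pvBsearch_spec lst lb hs lo ((lo + hi) / 2) (by omega) (by omega) hlow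
        (fun j hj hjl => by
          have h1 : lst[(lo + hi) / 2] ≤ lst[j]'hjl := hs ((lo + hi) / 2) j hj hjl
          rw [hgd] at hcmp; omega)
  · rw [dif_neg h]
    have heq : lo = hi := by omega
    subst heq
    exact ⟨hlow, hhigh, by omega⟩
termination_by hi - lo
decreasing_by all_goals omega

-- the scalar step of A equals the scalar step of B, for every last_position
lemma step_eq (html : String) (ch : Char) (lp : Int) :
    get_str_position ch html lp false
    = (let s := html.toList
       let n : Int := s.length
       let start := lp + 1
       let lb := if 0 ≤ start then start else if 0 ≤ n + start then n + start else 0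
       match (pvBuildPositions s).get? ch with
       | none => lp
       | some lst =>
           let lo := pvBsearch lst lb 0 lst.length
           if lo < lst.length then lst.getD lo 0 else lp) := by
  unfold get_str_position
  rw [if_neg (by simp)]
  have hstr : PySem.Str.findFrom html (String.singleton ch) (lp + 1)
      = PySem.Chars.findFrom html.toList [ch] (lp + 1) := by
    have : (String.singleton ch).toList = [ch] := by simp
    simp [PySem.Str.findFrom, this]
  rw [hstr]
  set t := html.toList with ht
  set L : Int := if 0 ≤ lp + 1 then lp + 1
    else if 0 ≤ (t.length : Int) + (lp + 1) then (t.length : Int) + (lp + 1) else 0 with hLdef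
  have hL0 : 0 ≤ L := by rw [hLdef]; split_ifs <;> omega
  have hLk : ((L.toNat : Int)) = L := Int.toNat_of_nonneg hL0
  have htake : List.take ((t.length : Int)).toNat t = t := by simp
  have hff : PySem.Chars.findFrom t [ch] (lp + 1)
      = (if (t.length : Int) < L then -1
         else if PySem.Chars.find (t.drop L.toNat) [ch] = -1 then -1
         else L + PySem.Chars.find (t.drop L.toNat) [ch]) := by
    rw [findFrom_none_unfold]
    have h1 : (if lp + 1 < 0 then if lp + 1 + (t.length : Int) < 0 then 0
        else lp + 1 + (t.length : Int) else lp + 1) = L := by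
      rw [hLdef]; split_ifs <;> omega
    simp only [htake, h1]
  rw [hff]
  show (if (if (t.length : Int) < L then -1
          else if PySem.Chars.find (t.drop L.toNat) [ch] = -1 then -1
          else L + PySem.Chars.find (t.drop L.toNat) [ch]) = -1 then lp
        else (if (t.length : Int) < L then -1
          else if PySem.Chars.find (t.drop L.toNat) [ch] = -1 then -1
          else L + PySem.Chars.find (t.drop L.toNat) [ch]))
      = (match (pvBuildPositions t).get? ch with
        | none => lp
        | some lst =>
            if pvBsearch lst L 0 lst.length < lst.length
            then lst.getD (pvBsearch lst L 0 lst.length) 0 else lp)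
  by_cases hmem : ch ∈ t
  · rw [build_get?_some t ch hmem]
    show _ = (if pvBsearch (posOf t ch 0) L 0 (posOf t ch 0).length < (posOf t ch 0).length
        then (posOf t ch 0).getD (pvBsearch (posOf t ch 0) L 0 (posOf t ch 0).length) 0 else lp)
    set lst := posOf t ch 0 with hlst
    have hsort : lst.Pairwise (· < ·) := posOf_sorted t ch 0
    have hmono : ∀ i j : Nat, (hij : i ≤ j) → (hj : j < lst.length) → lst[i]'(by omega) ≤ lst[j] := by
      intro i j hij hj
      rcases Nat.lt_or_eq_of_le hij with hlt | heq
      · exact le_of_lt ((List.pairwise_iff_getElem.mp hsort) i j (by omega) hj hlt)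
      · subst heq; exact le_refl _
    obtain ⟨hlow', hhigh', hrle⟩ := pvBsearch_spec lst L hmono 0 lst.length (Nat.zero_le _) le_rfl
      (fun j hj _ => absurd hj (Nat.not_lt_zero j))
      (fun j hj hjl => absurd hjl (by omega))
    set r := pvBsearch lst L 0 lst.length with hr
    have hmemlst : ∀ x : Int, x ∈ lst ↔ ∃ j : Nat, t[j]? = some ch ∧ x = (j : Int) := by
      intro x
      rw [hlst, mem_posOf]
      simp
    have hjlen : ∀ j : Nat, t[j]? = some ch → j < t.length := by
      intro j hj
      exact (List.getElem?_eq_some_iff.mp hj).1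
    by_cases h1 : (t.length : Int) < L
    · -- start beyond html: A keeps lp, and every stored position is < L so r = len
      rw [if_pos h1]
      have hrlen : ¬ r < lst.length := by
        intro hrlen
        have hy : L ≤ lst[r] := hhigh' r le_rfl hrlen
        obtain ⟨j, hj, hyj⟩ := (hmemlst lst[r]).1 (List.getElem_mem hrlen)
        have := hjlen j hj
        omega
      rw [if_neg hrlen]
      simp
    · rw [if_neg h1]
      by_cases hq1 : PySem.Chars.find (t.drop L.toNat) [ch] = -1
      · -- no occurrence at or after L: A keeps lp, and r = len
        rw [if_pos hq1]
        have hnone : ∀ i : Nat, t[L.toNat + i]? ≠ some ch := by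
          intro i hi
          have h2 := (find_char_none_iff (t.drop L.toNat) ch).1 hq1 i
          rw [List.getElem?_drop] at h2
          exact h2 hi
        have hrlen : ¬ r < lst.length := by
          intro hrlen
          have hy : L ≤ lst[r] := hhigh' r le_rfl hrlen
          obtain ⟨j, hj, hyj⟩ := (hmemlst lst[r]).1 (List.getElem_mem hrlen)
          have hkj : L.toNat ≤ j := by omega
          exact hnone (j - L.toNat)
            (by rw [show L.toNat + (j - L.toNat) = j from by omega]; exact hj)
        rw [if_neg hrlen]
        simp
      · -- an occurrence exists: both sides are the first index ≥ L holding ch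
        rw [if_neg hq1]
        set q := PySem.Chars.find (t.drop L.toNat) [ch] with hqdef
        have hq0 : 0 ≤ q := by
          have h2 := PySem.Chars.neg_one_le_find (t.drop L.toNat) [ch]
          rw [← hqdef] at h2
          omega
        rw [if_neg (show ¬ (L + q = -1) by omega)]
        obtain ⟨hpre, hmin⟩ := PySem.Chars.find_spec (s := t.drop L.toNat) (sub := [ch]) hq0
        have hx0occ : t[L.toNat + q.toNat]? = some ch := by
          have h2 := (occ_iff (t.drop L.toNat) ch q.toNat).1 hpre
          rwa [List.getElem?_drop] at h2
        have hmini : ∀ i : Nat, i < q.toNat → t[L.toNat + i]? ≠ some ch := by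
          intro i hi hocc
          exact hmin i hi ((occ_iff (t.drop L.toNat) ch i).2 (by rwa [List.getElem?_drop]))
        have hx0mem : ((L.toNat + q.toNat : Nat) : Int) ∈ lst :=
          (hmemlst _).2 ⟨L.toNat + q.toNat, hx0occ, rfl⟩
        obtain ⟨i0, hi0len, hi0⟩ := List.mem_iff_getElem.mp hx0mem
        have hx0geL : L ≤ ((L.toNat + q.toNat : Nat) : Int) := by push_cast; omega
        have hrlen : r < lst.length := by
          by_contra hrlen
          have hi0r : i0 < r := by omega
          have h2 := hlow' i0 hi0r hi0len
          rw [hi0] at h2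
          omega
        rw [if_pos hrlen, List.getD_eq_getElem lst 0 hrlen]
        have hyL : L ≤ lst[r] := hhigh' r le_rfl hrlen
        obtain ⟨j', hj', hyj'⟩ := (hmemlst lst[r]).1 (List.getElem_mem hrlen)
        have hkj' : L.toNat ≤ j' := by
          rw [hyj'] at hyL
          omega
        have hylex0 : lst[r] ≤ ((L.toNat + q.toNat : Nat) : Int) := by
          have hri0 : r ≤ i0 := by
            by_contra hri0
            have h2 := hlow' i0 (by omega) hi0len
            rw [hi0] at h2
            omega
          have h2 := hmono r i0 hri0 hi0len
          rw [hi0] at h2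
          exact h2
        have hx0ley : ((L.toNat + q.toNat : Nat) : Int) ≤ lst[r] := by
          have hj'ge : L.toNat + q.toNat ≤ j' := by
            by_contra hj'lt
            exact hmini (j' - L.toNat) (by omega)
              (by rw [show L.toNat + (j' - L.toNat) = j' from by omega]; exact hj')
          rw [hyj']
          push_cast
          omega
        have hfin : lst[r] = L + q := by
          rw [le_antisymm hylex0 hx0ley]
          push_cast
          omega
        rw [hfin]
  · rw [build_get?_none t ch hmem]
    show _ = lp
    have hfindnone : PySem.Chars.find (t.drop L.toNat) [ch] = -1 := by
      rw [find_char_none_iff]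
      intro i hi
      rw [List.getElem?_drop] at hi
      exact hmem (List.mem_of_getElem? hi)
    rw [hfindnone]
    split_ifs <;> omega

-- ===== VERDICT (by name: the statement is the Claim_ definition above) =====
theorem get_text_positions_spec : Claim_equal_get_text_positions := by
  intro text html lp is_eval _
  unfold Spec_get_text_positions get_text_positions get_text_positions_alt
  cases is_eval with
  | true => rfl
  | false =>
    simp only [Bool.false_eq_true, if_false]
    refine congrArg (fun f => List.foldl f (lp, ([] : List Int)) text.toList) ?_
    funext st c
    show (get_str_position c html st.1 false, st.2 ++ [get_str_position c html st.1 false]) = _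
    rw [step_eq html c st.1]
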